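-- pv_equiv track=rewrite | github.com/golbeng-original/algoritm-parctice | programmers/kakao_intership_2024_winter/task3/main.py | calculate_probability
-- ===== SOURCE A (Python) =====
-- from typing import List
-- import itertools
--
-- def calculate_probability(dice_a:List[List[int]], dice_b:List[List[int]]):
--
--     outcomes_a = list(itertools.product(*dice_a))
--     outcomes_b = list(itertools.product(*dice_b))
--
--     win = 0
--     for outcome_a in outcomes_a:
--         sum_a = sum(outcome_a)
--
--         for outcome_b in outcomes_b:
--             sum_b = sum(outcome_b)
--
--             if sum_a > sum_b:
--                 win += 1
--
--     return win
-- ===== SOURCE B (Python) =====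
-- def calculate_probability(dice_a, dice_b):
--     # DP convolution of sums instead of materialising product tuples,
--     # then sort the B-side sums and binary-search each A-side sum.
--     sums_a = [0]
--     for die in dice_a:
--         sums_a = [s + f for s in sums_a for f in die]
--     sums_b = [0]
--     for die in dice_b:
--         sums_b = [s + f for s in sums_b for f in die]
--     sorted_b = sorted(sums_b)
--     win = 0
--     for s in sums_a:
--         lo, hi = 0, len(sorted_b)
--         while lo < hi:
--             mid = (lo + hi) // 2
--             if sorted_b[mid] < s:
--                 lo = mid + 1
--             else:
--                 hi = mid
--         win += lo
--     return win
-- ===== Notes on version B (the rewrite author's own statement) =====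
-- stated objective: faster
-- what changed: Replaces the nested loop over all outcome tuple pairs (re-summing each B tuple every time) with a DP convolution of sums and a binary search of each A-sum against the sorted B-sums.
import Mathlib
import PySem

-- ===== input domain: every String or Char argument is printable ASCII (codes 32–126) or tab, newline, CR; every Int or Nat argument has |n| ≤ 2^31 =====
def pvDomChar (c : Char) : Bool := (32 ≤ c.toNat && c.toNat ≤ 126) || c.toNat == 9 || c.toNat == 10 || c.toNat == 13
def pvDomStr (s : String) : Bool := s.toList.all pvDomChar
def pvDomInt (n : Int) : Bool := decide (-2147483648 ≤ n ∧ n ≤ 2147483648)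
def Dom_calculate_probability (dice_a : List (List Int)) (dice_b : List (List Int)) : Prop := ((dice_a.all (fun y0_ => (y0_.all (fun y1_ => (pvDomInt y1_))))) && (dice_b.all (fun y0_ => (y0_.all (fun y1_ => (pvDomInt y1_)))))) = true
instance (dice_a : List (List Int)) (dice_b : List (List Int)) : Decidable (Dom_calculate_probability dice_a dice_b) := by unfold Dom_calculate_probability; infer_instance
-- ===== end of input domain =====

-- B replaces A's nested loop over all outcome-tuple pairs by a DP convolution of
-- sums plus a binary search of each A-side sum against the sorted B-side sums (faster).


-- ===== PORT A =====
-- itertools.product(*dice): first factor varies slowest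
def pyProduct : List (List Int) → List (List Int)
  | [] => [[]]
  | d :: rest => d.flatMap (fun x => (pyProduct rest).map (fun t => x :: t))

def calculate_probability (dice_a : List (List Int)) (dice_b : List (List Int)) : Int :=
  let outcomes_a := pyProduct dice_a
  let outcomes_b := pyProduct dice_b
  outcomes_a.foldl (fun win outcome_a =>
    let sum_a := outcome_a.sum
    outcomes_b.foldl (fun win outcome_b =>
      let sum_b := outcome_b.sum
      if sum_a > sum_b then win + 1 else win) win) 0

-- ===== PORT B =====
-- [s + f for s in sums for f in die], folded over the dice
def convSums (dice : List (List Int)) : List Int :=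
  dice.foldl (fun sums die => sums.flatMap (fun s => die.map (fun f => s + f))) [0]

-- Source B's hand-written lo/hi binary search is exactly bisect_left = PySem.List.bisectLeft
def calculate_probability_alt (dice_a : List (List Int)) (dice_b : List (List Int)) : Int :=
  let sums_a := convSums dice_a
  let sums_b := convSums dice_b
  let sorted_b := PySem.List.sorted sums_b (fun x => x) false
  sums_a.foldl (fun win s => win + (PySem.List.bisectLeft sorted_b s : Int)) 0

-- ===== PRECONDITION & SPEC =====
def Spec_calculate_probability (dice_a : List (List Int)) (dice_b : List (List Int)) (out : Int) : Prop := out = calculate_probability_alt dice_a dice_b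
instance (dice_a : List (List Int)) (dice_b : List (List Int)) (out : Int) : Decidable (Spec_calculate_probability dice_a dice_b out) := by unfold Spec_calculate_probability; infer_instance

-- ===== CLAIM (what is proved, stated in full; the proofs are below) =====
def Claim_equal_calculate_probability : Prop := ∀ (dice_a : List (List Int)) (dice_b : List (List Int)), Dom_calculate_probability dice_a dice_b → Spec_calculate_probability dice_a dice_b (calculate_probability dice_a dice_b)

-- ===== LEMMAS AND PROOFS =====

-- the convolution fold computes the sums of the product tuples, in product order
theorem convSums_gen (dice : List (List Int)) : ∀ (acc : List Int),
    dice.foldl (fun sums die => sums.flatMap (fun s => die.map (fun f => s + f))) acc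
      = acc.flatMap (fun s => (pyProduct dice).map (fun t => s + t.sum)) := by
  induction dice with
  | nil => intro acc; simp [pyProduct]
  | cons d rest ih =>
      intro acc
      simp only [List.foldl_cons, ih, pyProduct]
      simp [List.flatMap_assoc, List.flatMap_map, List.map_flatMap, Function.comp_def, List.sum_cons, add_assoc]

theorem convSums_eq (dice : List (List Int)) :
    convSums dice = (pyProduct dice).map (fun t => t.sum) := by
  simp [convSums, convSums_gen]

-- A's inner loop counts the outcomes_b with smaller sum
theorem inner_count (sa : Int) (outB : List (List Int)) : ∀ (w : Int),
    outB.foldl (fun win ob => if sa > ob.sum then win + 1 else win) w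
      = w + (outB.countP (fun ob => decide (ob.sum < sa)) : Int) := by
  induction outB with
  | nil => intro w; simp
  | cons b t ih =>
      intro w
      simp only [List.foldl_cons, List.countP_cons, ih]
      by_cases h : b.sum < sa
      · simp [h, gt_iff_lt]; ring
      · simp [h, gt_iff_lt]

-- countP of (· < x) equals the bisect boundary characterised by bisectLeft_spec
theorem countP_of_boundary (ys : List Int) (x : Int) (k : Nat) (hk : k ≤ ys.length)
    (h1 : ∀ j (hj : j < ys.length), j < k → ys[j] < x)
    (h2 : ∀ j (hj : j < ys.length), k ≤ j → x ≤ ys[j]) :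
    ys.countP (fun t => decide (t < x)) = k := by
  rw [← List.take_append_drop k ys, List.countP_append]
  have hlen : (ys.take k).length = k := by simp [hk]
  have ht : (ys.take k).countP (fun t => decide (t < x)) = k := by
    rw [List.countP_eq_length.mpr, hlen]
    intro a ha
    obtain ⟨j, hj, rfl⟩ := List.mem_iff_getElem.mp ha
    have hjk : j < k := by simpa [hk] using hj
    have hjy : j < ys.length := lt_of_lt_of_le hjk hk
    simp only [List.getElem_take]
    exact decide_eq_true (h1 j hjy hjk)
  have hd : (ys.drop k).countP (fun t => decide (t < x)) = 0 := by
    rw [List.countP_eq_zero]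
    intro a ha
    obtain ⟨j, hj, rfl⟩ := List.mem_iff_getElem.mp ha
    have hjy : k + j < ys.length := by
      have hj' := hj; simp only [List.length_drop] at hj'; omega
    simp only [List.getElem_drop]
    simp only [decide_eq_true_eq, not_lt]
    exact h2 (k + j) hjy (Nat.le_add_right _ _)
  omega

theorem bisect_eq_countP (xs : List Int) (x : Int) :
    (PySem.List.bisectLeft (PySem.List.sorted xs (fun y => y) false) x : Int)
      = (xs.countP (fun t => decide (t < x)) : Int) := by
  set ys := PySem.List.sorted xs (fun y => y) false with hys
  have hsorted : List.Pairwise (fun a b => a ≤ b) ys :=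
    PySem.List.sorted_pairwise xs (fun y => y)
  obtain ⟨hk, h1, h2⟩ := PySem.List.bisectLeft_spec ys x hsorted
  have hcount : ys.countP (fun t => decide (t < x)) = PySem.List.bisectLeft ys x :=
    countP_of_boundary ys x _ hk h1 h2
  have hperm : ys.Perm xs := PySem.List.sorted_perm xs (fun y => y) false
  rw [← hperm.countP_eq, hcount]

-- ===== VERDICT (by name: the statement is the Claim_ definition above) =====
theorem calculate_probability_spec : Claim_equal_calculate_probability := by
  intro dice_a dice_b _
  unfold Spec_calculate_probability calculate_probability calculate_probability_alt
  simp only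
  have hA : ∀ (L : List (List Int)) (w : Int),
      L.foldl (fun win outcome_a =>
        (pyProduct dice_b).foldl (fun win outcome_b =>
          if outcome_a.sum > outcome_b.sum then win + 1 else win) win) w
      = (L.map (fun t => t.sum)).foldl (fun win s =>
          win + (PySem.List.bisectLeft
            (PySem.List.sorted (convSums dice_b) (fun x => x) false) s : Int)) w := by
    intro L
    induction L with
    | nil => intro w; simp
    | cons a t ih =>
        intro w
        simp only [List.foldl_cons, List.map_cons, ih]
        congr 1
        rw [inner_count, bisect_eq_countP (convSums dice_b) a.sum, convSums_eq,
          List.countP_map]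
        rfl
  rw [convSums_eq dice_a, hA]
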